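-- pv_equiv track=rewrite | github.com/npbauman/SymGen | Utilities.py | expand_exponential
-- ===== SOURCE A (Python) =====
-- def expand_exponential(operator_list, commutator_order, flip_sign=False):
-- # FORM THE EXPANSIONS OF THE LEFT AND RIGHT EXPONENTIALS
-- # ------------------------------------------------------
-- # Only gives the combination of terms, not the weight.
--
--     expanded_list = [""]
--     for _ in range(commutator_order):
--         new_expanded_list = [""]
--         for term in expanded_list:
--             for o in operator_list:
--                 if flip_sign:
--                     # Flip the sign of operators
--                     o = o[1:] if o.startswith("-") else "-" + o
--                 # Determine the sign based on the count of "-" in the new term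
--                 sign = "" if (term + o).count("-") % 2 == 0 else "-"
--                 # Append the new term with adjusted sign and without "-" in the operands
--                 new_expanded_list.append(sign + term.replace('-', '') + o.replace('-', ''))
--         expanded_list = new_expanded_list
--     return expanded_list
-- ===== SOURCE B (Python) =====
-- def _prod(ops, L):
--     # all L-tuples over ops, in itertools.product order (last position fastest)
--     if L == 0:
--         return [()]
--     return [t + (o,) for t in _prod(ops, L - 1) for o in ops]
--
--
-- def expand_exponential(operator_list, commutator_order, flip_sign=False):
--     # Preprocess each operator once: flipped sign, dash-stripped body, dash count.
--     ops = []
--     for o in operator_list: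
--         if flip_sign:
--             o = o[1:] if o.startswith("-") else "-" + o
--         ops.append((o.replace("-", ""), o.count("-")))
--     out = []
--     for L in range(max(commutator_order, 0) + 1):
--         for t in _prod(ops, L):
--             parity = sum(c for _, c in t) % 2
--             out.append(("-" if parity else "") + "".join(b for b, _ in t))
--     return out
-- ===== Notes on version B (the rewrite author's own statement) =====
-- stated objective: alternative
-- what changed: Replaces A's iterative fixpoint that rebuilds the whole term list each round (re-cleaning and re-signing every previously emitted term) by a one-time preprocessing of each operator (flipped, dash-stripped body, dash count) followed by a direct length-by-length cartesian enumeration with parity-summed signs.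
import Mathlib
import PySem

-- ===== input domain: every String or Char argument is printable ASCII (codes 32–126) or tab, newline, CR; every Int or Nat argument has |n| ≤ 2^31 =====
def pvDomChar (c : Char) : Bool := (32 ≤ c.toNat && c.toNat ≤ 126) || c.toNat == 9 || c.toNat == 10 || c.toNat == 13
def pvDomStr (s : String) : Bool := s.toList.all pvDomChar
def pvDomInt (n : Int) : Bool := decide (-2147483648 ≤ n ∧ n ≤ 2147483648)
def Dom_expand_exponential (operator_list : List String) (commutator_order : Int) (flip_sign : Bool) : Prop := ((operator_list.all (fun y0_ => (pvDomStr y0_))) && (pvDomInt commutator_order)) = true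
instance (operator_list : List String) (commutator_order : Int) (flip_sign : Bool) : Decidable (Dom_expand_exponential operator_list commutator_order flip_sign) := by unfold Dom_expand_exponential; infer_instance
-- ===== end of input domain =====

-- B replaces A's round-by-round fixpoint rebuild (which re-cleans and re-signs every term each
-- round) by one-time operator preprocessing plus a direct length-by-length cartesian enumeration
-- with parity-summed signs (objective: alternative algorithm, same results).

-- ===== PORT A =====
-- Strings are handled as code-point lists (PySem.Chars), converted at the boundary;
-- range(n) iterates n.toNat times (empty for negative n — exact Python range behaviour).
def expand_exponential (operator_list : List String) (commutator_order : Int) (flip_sign : Bool) : List String :=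
  let ops := operator_list.map String.toList
  let result :=
    (List.range commutator_order.toNat).foldl (fun expanded _ =>
      expanded.foldl (fun acc term =>
        ops.foldl (fun acc2 o0 =>
          let o := if flip_sign then
              (if PySem.Chars.startswith o0 ['-'] then PySem.List.slice o0 (some 1) none else '-' :: o0)
            else o0
          let sign : List Char := if PySem.Chars.count (term ++ o) ['-'] % 2 == 0 then [] else ['-']
          acc2 ++ [sign ++ PySem.Chars.replace term ['-'] [] ++ PySem.Chars.replace o ['-'] []]) acc)
        [[]])
      [([] : List Char)]
  result.map (fun cs => String.mk cs)

-- ===== PORT B =====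
-- _prep: flip the sign if requested, then return (dash-stripped body, dash count).
def pvPrep (o : List Char) (flip_sign : Bool) : List Char × Nat :=
  let o := if flip_sign then
      (if PySem.Chars.startswith o ['-'] then PySem.List.slice o (some 1) none else '-' :: o)
    else o
  (PySem.Chars.replace o ['-'] [], PySem.Chars.count o ['-'])

-- _prod ops L: all L-tuples over ops in itertools.product order (last position fastest)
def pvProdRep (ops : List (List Char × Nat)) : Nat → List (List (List Char × Nat))
  | 0 => [[]]
  | L + 1 => (pvProdRep ops L).flatMap (fun t => ops.map (fun o => t ++ [o]))

-- "".join of the bodies is ported as flatten; sum of the counts as List.sum.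
def expand_exponential_alt (operator_list : List String) (commutator_order : Int) (flip_sign : Bool) : List String :=
  let ops := operator_list.map (fun o => pvPrep o.toList flip_sign)
  let out :=
    (List.range ((max commutator_order 0 + 1).toNat)).foldl (fun out L =>
      (pvProdRep ops L).foldl (fun out2 t =>
        out2 ++ [(if (t.map Prod.snd).sum % 2 == 1 then ['-'] else ([] : List Char))
                  ++ (t.map Prod.fst).flatten]) out) []
  out.map (fun cs => String.mk cs)

-- ===== PRECONDITION & SPEC =====
def Spec_expand_exponential (operator_list : List String) (commutator_order : Int) (flip_sign : Bool) (out : List String) : Prop := out = expand_exponential_alt operator_list commutator_order flip_sign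
instance (operator_list : List String) (commutator_order : Int) (flip_sign : Bool) (out : List String) : Decidable (Spec_expand_exponential operator_list commutator_order flip_sign out) := by unfold Spec_expand_exponential; infer_instance

-- ===== CLAIM (what is proved, stated in full; the proofs are below) =====
def Claim_equal_expand_exponential : Prop := ∀ (operator_list : List String) (commutator_order : Int) (flip_sign : Bool), Dom_expand_exponential operator_list commutator_order flip_sign → Spec_expand_exponential operator_list commutator_order flip_sign (expand_exponential operator_list commutator_order flip_sign)

-- ===== LEMMAS AND PROOFS =====

-- Chars.count with the single-character pattern "-" counts the dashes.
theorem pvCountGo (fuel : Nat) (cs : List Char) (acc : Nat) (h : cs.length ≤ fuel) :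
    PySem.Chars.count.go ['-'] fuel cs acc = acc + cs.count '-' := by
  induction cs generalizing fuel acc with
  | nil => rw [PySem.Chars.count.go.eq_def]; cases fuel <;> simp
  | cons c t ih =>
    cases fuel with
    | zero => simp at h
    | succ f =>
      rw [PySem.Chars.count.go.eq_def]
      dsimp only
      simp only [List.length_cons] at h
      by_cases hc : c = '-'
      · subst hc
        simp only [List.isPrefixOf, BEq.rfl, Bool.true_and, if_true, List.length_singleton, List.drop_succ_cons, List.drop_zero]
        rw [ih f (acc + 1) (by omega)]
        simp; omega
      · have hpre : (['-'].isPrefixOf (c :: t)) = false := by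
          simp [List.isPrefixOf]; exact fun hh => (hc hh.symm).elim
        rw [hpre]
        simp only [Bool.false_eq_true, if_false]
        rw [ih f acc (by omega)]
        simp [hc]

theorem pvCountDash (cs : List Char) : PySem.Chars.count cs ['-'] = cs.count '-' := by
  rw [PySem.Chars.count]
  simp only [List.isEmpty_cons, Bool.false_eq_true, if_false]
  rw [pvCountGo cs.length cs 0 le_rfl]; omega

-- Chars.replace of "-" by "" filters the dashes out.
theorem pvReplaceGo (fuel : Nat) (cs acc : List Char) (h : cs.length ≤ fuel) :
    PySem.Chars.replace.go ['-'] [] fuel cs acc = acc.reverse ++ cs.filter (fun c => c != '-') := by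
  induction cs generalizing fuel acc with
  | nil => rw [PySem.Chars.replace.go.eq_def]; cases fuel <;> simp
  | cons c t ih =>
    cases fuel with
    | zero => simp at h
    | succ f =>
      rw [PySem.Chars.replace.go.eq_def]
      dsimp only
      simp only [List.length_cons] at h
      by_cases hc : c = '-'
      · subst hc
        simp only [List.isPrefixOf, BEq.rfl, Bool.true_and, if_true, List.length_singleton, List.drop_succ_cons, List.drop_zero, List.reverse_nil,
          List.nil_append]
        rw [ih f acc (by omega)]
        simp
      · have hpre : (['-'].isPrefixOf (c :: t)) = false := by
          simp [List.isPrefixOf]; exact fun hh => (hc hh.symm).elim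
        rw [hpre]
        simp only [Bool.false_eq_true, if_false]
        rw [ih f (c :: acc) (by omega)]
        simp [hc]

theorem pvReplaceDash (cs : List Char) :
    PySem.Chars.replace cs ['-'] [] = cs.filter (fun c => c != '-') := by
  rw [PySem.Chars.replace]
  simp only [List.isEmpty_cons, Bool.false_eq_true, if_false]
  rw [pvReplaceGo cs.length cs [] le_rfl]; simp

-- A's inner-loop body as a function of the raw operator (flip + sign + clean).
def pvProc (flip_sign : Bool) (term o0 : List Char) : List Char :=
  let o := if flip_sign then
      (if PySem.Chars.startswith o0 ['-'] then PySem.List.slice o0 (some 1) none else '-' :: o0)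
    else o0
  let sign : List Char := if PySem.Chars.count (term ++ o) ['-'] % 2 == 0 then [] else ['-']
  sign ++ PySem.Chars.replace term ['-'] [] ++ PySem.Chars.replace o ['-'] []

-- B's emitted string for a tuple of preprocessed operators.
def pvRender (t : List (List Char × Nat)) : List Char :=
  (if (t.map Prod.snd).sum % 2 == 1 then ['-'] else ([] : List Char)) ++ (t.map Prod.fst).flatten

-- tuples whose bodies are dash-free
def pvGood (t : List (List Char × Nat)) : Prop := ∀ p ∈ t, p.1.count '-' = 0

theorem pvPrep_body_dashfree (o : List Char) (fs : Bool) : (pvPrep o fs).1.count '-' = 0 := by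
  simp only [pvPrep, pvReplaceDash]
  simp [List.count_eq_zero]

theorem pvGood_mem_prodRep (E : List (List Char × Nat)) (hE : ∀ p ∈ E, p.1.count '-' = 0)
    (L : Nat) (t : List (List Char × Nat)) (ht : t ∈ pvProdRep E L) : pvGood t := by
  induction L generalizing t with
  | zero => simp [pvProdRep] at ht; subst ht; intro p hp; simp at hp
  | succ n ih =>
    rw [pvProdRep] at ht
    rcases List.mem_flatMap.mp ht with ⟨t', ht', htm⟩
    obtain ⟨e, he, hte⟩ := List.mem_map.mp htm
    intro p hp
    rw [← hte] at hp
    rcases List.mem_append.mp hp with h | h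
    · exact ih t' ht' p h
    · simp at h; rw [h]; exact hE e he

theorem pvGood_flatten_dashfree (t : List (List Char × Nat)) (h : pvGood t) :
    (t.map Prod.fst).flatten.count '-' = 0 := by
  induction t with
  | nil => simp
  | cons p t ih =>
    simp only [List.map_cons, List.flatten_cons, List.count_append]
    rw [h p List.mem_cons_self, ih (fun q hq => h q (List.mem_cons_of_mem _ hq))]

theorem pvFilter_of_dashfree (cs : List Char) (h : cs.count '-' = 0) :
    cs.filter (fun c => c != '-') = cs := by
  rw [List.filter_eq_self]
  intro c hc
  simp only [bne_iff_ne, ne_eq]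
  intro hcd; subst hcd
  exact absurd h (by simp [List.count_eq_zero, hc])

theorem pvRender_count (t : List (List Char × Nat)) (h : pvGood t) :
    (pvRender t).count '-' = (t.map Prod.snd).sum % 2 := by
  simp only [pvRender, List.count_append, pvGood_flatten_dashfree t h]
  rcases Nat.mod_two_eq_zero_or_one ((t.map Prod.snd).sum) with h2 | h2 <;> simp [h2]

theorem pvRender_filter (t : List (List Char × Nat)) (h : pvGood t) :
    (pvRender t).filter (fun c => c != '-') = (t.map Prod.fst).flatten := by
  simp only [pvRender, List.filter_append]
  rw [pvFilter_of_dashfree _ (pvGood_flatten_dashfree t h)]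
  split <;> simp

-- the key pointwise step: processing a rendered tuple with one more raw operator
-- renders the extended tuple
theorem pvProc_render (fs : Bool) (o0 : List Char) (t : List (List Char × Nat)) (h : pvGood t) :
    pvProc fs (pvRender t) o0 = pvRender (t ++ [pvPrep o0 fs]) := by
  simp only [pvProc, pvPrep]
  rw [pvCountDash, List.count_append, pvRender_count t h, pvReplaceDash (pvRender t),
    pvRender_filter t h, pvReplaceDash, pvCountDash]
  conv_rhs => rw [pvRender]
  simp only [List.map_append, List.sum_append, List.flatten_append, List.map_cons,
    List.map_nil, List.sum_cons, List.sum_nil, List.flatten_cons, List.flatten_nil,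
    List.append_nil, List.append_assoc]
  have hm : ∀ a b : Nat, (a % 2 + b) % 2 = (a + b) % 2 := fun a b => by omega
  rw [hm]
  split_ifs with h1 h2 <;> simp_all

theorem pvFoldlCongr {α β : Type} (l : List β) (f g : α → β → α) (a : α)
    (h : ∀ acc x, f acc x = g acc x) : l.foldl f a = l.foldl g a := by
  have : f = g := by funext acc x; exact h acc x
  rw [this]

theorem pvFlatMap_congr {α β : Type} (l : List α) (f g : α → List β)
    (h : ∀ a ∈ l, f a = g a) : l.flatMap f = l.flatMap g := by
  induction l with
  | nil => rfl
  | cons x l ih =>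
    simp only [List.flatMap_cons]
    rw [h x List.mem_cons_self, ih (fun a ha => h a (List.mem_cons_of_mem _ ha))]

-- B's per-length blocks
def pvLevels (E : List (List Char × Nat)) (L : Nat) : List (List Char) :=
  (pvProdRep E L).map pvRender

theorem pvLevel_step (fs : Bool) (ops : List (List Char)) (L : Nat) :
    (pvLevels (ops.map (fun o => pvPrep o fs)) L).flatMap
        (fun term => ops.map (pvProc fs term))
      = pvLevels (ops.map (fun o => pvPrep o fs)) (L + 1) := by
  set E := ops.map (fun o => pvPrep o fs) with hE
  have hEgood : ∀ p ∈ E, p.1.count '-' = 0 := by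
    intro p hp
    simp only [hE, List.mem_map] at hp
    obtain ⟨o, _, rfl⟩ := hp
    exact pvPrep_body_dashfree o fs
  simp only [pvLevels, pvProdRep, List.flatMap_map, List.map_flatMap]
  apply pvFlatMap_congr
  intro t ht
  have hg : pvGood t := pvGood_mem_prodRep E hEgood L t ht
  simp only [hE, List.map_map]
  apply List.map_congr_left
  intro o _
  exact pvProc_render fs o t hg

-- A's round, in closed form
theorem pvAstep (fs : Bool) (ops : List (List Char)) (expanded : List (List Char)) :
    expanded.foldl (fun acc term =>
        ops.foldl (fun acc2 o0 =>
          let o := if fs then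
              (if PySem.Chars.startswith o0 ['-'] then PySem.List.slice o0 (some 1) none else '-' :: o0)
            else o0
          let sign : List Char := if PySem.Chars.count (term ++ o) ['-'] % 2 == 0 then [] else ['-']
          acc2 ++ [sign ++ PySem.Chars.replace term ['-'] [] ++ PySem.Chars.replace o ['-'] []]) acc)
      [[]]
    = [[]] ++ expanded.flatMap (fun term => ops.map (pvProc fs term)) := by
  have hinner : ∀ (term : List Char) (acc : List (List Char)),
      ops.foldl (fun acc2 o0 =>
          let o := if fs then
              (if PySem.Chars.startswith o0 ['-'] then PySem.List.slice o0 (some 1) none else '-' :: o0)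
            else o0
          let sign : List Char := if PySem.Chars.count (term ++ o) ['-'] % 2 == 0 then [] else ['-']
          acc2 ++ [sign ++ PySem.Chars.replace term ['-'] [] ++ PySem.Chars.replace o ['-'] []]) acc
        = acc ++ ops.map (pvProc fs term) := by
    intro term acc
    exact PySem.List.foldl_append_singleton_eq_map (pvProc fs term) ops acc
  calc expanded.foldl _ [[]]
      = expanded.foldl (fun acc term => acc ++ ops.map (pvProc fs term)) [[]] := by
        exact pvFoldlCongr expanded _ _ _ (fun acc term => hinner term acc)
    _ = [[]] ++ expanded.flatMap (fun term => ops.map (pvProc fs term)) :=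
        PySem.List.foldl_append_eq_flatMap _ expanded _

-- A's whole loop equals the concatenation of B's per-length blocks
theorem pvAfold (fs : Bool) (ops : List (List Char)) (k : Nat) :
    (List.range k).foldl (fun expanded _ =>
      expanded.foldl (fun acc term =>
        ops.foldl (fun acc2 o0 =>
          let o := if fs then
              (if PySem.Chars.startswith o0 ['-'] then PySem.List.slice o0 (some 1) none else '-' :: o0)
            else o0
          let sign : List Char := if PySem.Chars.count (term ++ o) ['-'] % 2 == 0 then [] else ['-']
          acc2 ++ [sign ++ PySem.Chars.replace term ['-'] [] ++ PySem.Chars.replace o ['-'] []]) acc)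
        [[]])
      [([] : List Char)]
    = (List.range (k + 1)).flatMap (fun L => pvLevels (ops.map (fun o => pvPrep o fs)) L) := by
  induction k with
  | zero => simp [pvLevels, pvProdRep, pvRender]
  | succ n ih =>
    rw [List.range_succ, List.foldl_append, List.foldl_cons, List.foldl_nil, ih, pvAstep]
    rw [List.flatMap_assoc]
    rw [pvFlatMap_congr _ _
      (fun L => pvLevels ((ops.map (fun o => pvPrep o fs))) (L + 1))
      (fun L _ => by simpa [pvLevels] using pvLevel_step fs ops L)]
    have h0 : ([[]] : List (List Char)) = pvLevels (ops.map (fun o => pvPrep o fs)) 0 := by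
      simp [pvLevels, pvProdRep, pvRender]
    rw [h0]
    conv_rhs => rw [List.range_succ_eq_map]
    rw [List.flatMap_cons, List.flatMap_map]

-- B's nested output loop in closed form
theorem pvBout (E : List (List Char × Nat)) (k : Nat) :
    (List.range k).foldl (fun out L =>
      (pvProdRep E L).foldl (fun out2 t =>
        out2 ++ [(if (t.map Prod.snd).sum % 2 == 1 then ['-'] else ([] : List Char))
                  ++ (t.map Prod.fst).flatten]) out) []
    = (List.range k).flatMap (fun L => pvLevels E L) := by
  have hinner : ∀ (L : Nat) (out : List (List Char)),
      (pvProdRep E L).foldl (fun out2 t =>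
        out2 ++ [(if (t.map Prod.snd).sum % 2 == 1 then ['-'] else ([] : List Char))
                  ++ (t.map Prod.fst).flatten]) out
        = out ++ pvLevels E L := by
    intro L out
    exact PySem.List.foldl_append_singleton_eq_map pvRender (pvProdRep E L) out
  calc (List.range k).foldl _ []
      = (List.range k).foldl (fun out L => out ++ pvLevels E L) [] := by
        exact pvFoldlCongr (List.range k) _ _ _ (fun out L => hinner L out)
    _ = [] ++ (List.range k).flatMap (fun L => pvLevels E L) :=
        PySem.List.foldl_append_eq_flatMap _ _ _
    _ = (List.range k).flatMap (fun L => pvLevels E L) := by simp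

-- ===== VERDICT (by name: the statement is the Claim_ definition above) =====
theorem expand_exponential_spec : Claim_equal_expand_exponential := by
  intro operator_list commutator_order flip_sign _
  simp only [Spec_expand_exponential, expand_exponential, expand_exponential_alt]
  have hk : (max commutator_order 0 + 1).toNat = commutator_order.toNat + 1 := by omega
  rw [hk, pvAfold flip_sign (operator_list.map String.toList) commutator_order.toNat,
      pvBout (operator_list.map (fun o => pvPrep o.toList flip_sign)) (commutator_order.toNat + 1),
      List.map_map]
  rfl
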